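-- pv_equiv track=rewrite | github.com/Frognar/Kata | prime-factors/prime_factors_pyapp_03/factors_of_tests.py | factors_of
-- ===== SOURCE A (Python) =====
-- def factors_of(n):
--     factors = []
--
--     if n > 1:
--         while n % 2 == 0:
--             factors.append(2)
--             n //= 2
--
--     if n > 1:
--         factors.append(n)
--     return factors
-- ===== SOURCE B (Python) =====
-- def factors_of(n):
--     if n <= 1:
--         return []
--     if n % 2 == 0:
--         return [2] + factors_of(n // 2)
--     return [n]
-- ===== Notes on version B (the rewrite author's own statement) =====
-- stated objective: alternative
-- what changed: Replaces the imperative while-loop-with-accumulator by a structural recursion on the halved argument that prepends the even prime factor and returns the singleton remainder at the first odd value.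
import Mathlib
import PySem

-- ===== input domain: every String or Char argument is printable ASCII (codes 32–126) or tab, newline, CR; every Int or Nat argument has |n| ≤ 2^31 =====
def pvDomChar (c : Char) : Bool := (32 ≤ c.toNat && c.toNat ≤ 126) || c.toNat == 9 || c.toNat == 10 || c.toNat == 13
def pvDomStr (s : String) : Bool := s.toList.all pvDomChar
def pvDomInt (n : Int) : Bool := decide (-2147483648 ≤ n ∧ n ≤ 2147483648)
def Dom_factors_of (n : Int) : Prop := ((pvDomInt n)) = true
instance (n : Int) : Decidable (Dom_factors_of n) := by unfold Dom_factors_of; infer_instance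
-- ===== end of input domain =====

-- B rewrites A's while loop as a structural recursion on n//2 (prepend 2s, return [n] at the first odd value).

-- ===== PORT A =====
-- the while loop: state is (factors, n); reached only with n > 1, so the 0 < n
-- guard (needed for termination) never changes behaviour on reachable states
def factors_of_loop (n : Int) (factors : List Int) : List Int × Int :=
  if h : PySem.Int.mod n 2 = 0 ∧ 0 < n then
    factors_of_loop (PySem.Int.floordiv n 2) (factors ++ [2])
  else
    (factors, n)
termination_by n.toNat
decreasing_by
  have h2 : PySem.Int.floordiv n 2 = n / 2 := PySem.Int.floordiv_eq_ediv_of_pos (by omega)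
  rw [h2]; omega

def factors_of (n : Int) : List Int :=
  let factors : List Int := []
  let s := if n > 1 then factors_of_loop n factors else (factors, n)
  if s.2 > 1 then s.1 ++ [s.2] else s.1

-- ===== PORT B =====
def factors_of_alt (n : Int) : List Int :=
  if h : n ≤ 1 then []
  else if h2 : PySem.Int.mod n 2 = 0 then
    2 :: factors_of_alt (PySem.Int.floordiv n 2)
  else [n]
termination_by n.toNat
decreasing_by
  have h3 : PySem.Int.floordiv n 2 = n / 2 := PySem.Int.floordiv_eq_ediv_of_pos (by omega)
  rw [h3]; omega

-- ===== PRECONDITION & SPEC =====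
def Spec_factors_of (n : Int) (out : List Int) : Prop := out = factors_of_alt n
instance (n : Int) (out : List Int) : Decidable (Spec_factors_of n out) := by unfold Spec_factors_of; infer_instance

-- ===== CLAIM (what is proved, stated in full; the proofs are below) =====
def Claim_equal_factors_of : Prop := ∀ (n : Int), Dom_factors_of n → Spec_factors_of n (factors_of n)

-- ===== LEMMAS AND PROOFS =====

-- loop invariant: finishing A's loop and appending the final odd remainder (if > 1)
-- yields acc ++ B's recursion, for every positive n
theorem alt_eq_nil {n : Int} (h : n ≤ 1) : factors_of_alt n = [] := by
  rw [factors_of_alt, dif_pos h]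

theorem alt_eq_even {n : Int} (h0 : ¬ n ≤ 1) (he : PySem.Int.mod n 2 = 0) :
    factors_of_alt n = 2 :: factors_of_alt (PySem.Int.floordiv n 2) := by
  rw [factors_of_alt, dif_neg h0, dif_pos he]

theorem alt_eq_odd {n : Int} (h0 : ¬ n ≤ 1) (he : ¬ PySem.Int.mod n 2 = 0) :
    factors_of_alt n = [n] := by
  rw [factors_of_alt, dif_neg h0, dif_neg he]

theorem factors_of_loop_eq (n : Int) (hn : 0 < n) (acc : List Int) :
    (if (factors_of_loop n acc).2 > 1 then (factors_of_loop n acc).1 ++ [(factors_of_loop n acc).2]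
     else (factors_of_loop n acc).1) = acc ++ factors_of_alt n := by
  induction hk : n.toNat using Nat.strong_induction_on generalizing n acc with
  | _ k ih =>
    subst hk
    have hm2 : PySem.Int.mod n 2 = n % 2 := PySem.Int.mod_eq_emod_of_pos (by omega)
    have hf2 : PySem.Int.floordiv n 2 = n / 2 := PySem.Int.floordiv_eq_ediv_of_pos (by omega)
    rw [factors_of_loop]
    by_cases he : n % 2 = 0
    · have hn2 : 2 ≤ n := by omega
      rw [dif_pos ⟨by rw [hm2]; exact he, hn⟩]
      rw [ih (PySem.Int.floordiv n 2).toNat (by rw [hf2]; omega)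
            (PySem.Int.floordiv n 2) (by rw [hf2]; omega) (acc ++ [2]) rfl]
      rw [alt_eq_even (n := n) (by omega) (by rw [hm2]; exact he)]
      simp only [List.append_assoc, List.singleton_append]
    · rw [dif_neg (fun h => he (by rw [← hm2]; exact h.1))]
      dsimp only
      by_cases h1 : 1 < n
      · rw [if_pos h1, alt_eq_odd (by omega) (by rw [hm2]; exact he)]
      · rw [if_neg h1, alt_eq_nil (by omega)]
        simp only [List.append_nil]

theorem factors_of_spec : Claim_equal_factors_of := by
  intro n _
  unfold Spec_factors_of factors_of
  by_cases h : n > 1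
  · simpa [h] using factors_of_loop_eq n (by omega) []
  · rw [factors_of_alt]
    simp [h, show n ≤ 1 by omega]
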